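-- pv_equiv track=rewrite | github.com/adeebshihadeh/nand2tetris | projects/06/assembler.py | build_symbol_table
-- ===== SOURCE A (Python) =====
-- def build_symbol_table(asm):
--   ret = {"SP": 0, "LCL": 1, "ARG": 2, "THIS": 3, "THAT": 4, "SCREEN": 16384,
--           "KBD": 24576}
--   ret.update({("R" + str(n)): n for n in range(16)})
--   labels = [l.split("(")[1].split(")")[0] for l in asm if "(" in l]
--
--   idx, addr = 0, 16
--   for i in asm:
--     if "(" in i:
--       ret[i.split("(")[1].split(")")[0]] = idx
--     else:
--       if "@" in i and not i[i.index("@")+1].isdigit():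
--         sym = i.split("@")[1]
--         if sym not in ret and sym not in labels:
--           ret[sym] = addr
--           addr += 1
--       idx += 1
--   return ret
-- ===== SOURCE B (Python) =====
-- def build_symbol_table(asm):
--     # Pass 1: parse every line once into a token stream.
--     #   (name, idx)  -- a label definition with its instruction index
--     #   (name, None) -- a symbolic @-reference
--     # Plain lines produce no token; they only advance the instruction index.
--     tokens = []
--     idx = 0
--     for line in asm:
--         if "(" in line:
--             tokens.append((line.split("(")[1].split(")")[0], idx))
--         else:
--             if "@" in line and not line[line.index("@") + 1].isdigit():
--                 tokens.append((line.split("@")[1], None))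
--             idx += 1
--
--     label_names = {name for name, v in tokens if v is not None}
--
--     ret = {"SP": 0, "LCL": 1, "ARG": 2, "THIS": 3, "THAT": 4,
--            "SCREEN": 16384, "KBD": 24576}
--     for n in range(16):
--         ret["R" + str(n)] = n
--
--     # Pass 2: fold the tokens into the table; no string parsing here.
--     addr = 16
--     for name, v in tokens:
--         if v is not None:
--             ret[name] = v
--         elif name not in label_names and name not in ret:
--             ret[name] = addr
--             addr += 1
--     return ret
-- ===== Notes on version B (the rewrite author's own statement) =====
-- stated objective: alternative
-- what changed: A parses strings and builds the table in one interleaved loop with a precomputed labels comprehension; B parses each line exactly once into a token stream (label-with-index / @-symbol), derives the label set from the tokens, and folds the tokens into the table in a separate string-free pass.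
import Mathlib
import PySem

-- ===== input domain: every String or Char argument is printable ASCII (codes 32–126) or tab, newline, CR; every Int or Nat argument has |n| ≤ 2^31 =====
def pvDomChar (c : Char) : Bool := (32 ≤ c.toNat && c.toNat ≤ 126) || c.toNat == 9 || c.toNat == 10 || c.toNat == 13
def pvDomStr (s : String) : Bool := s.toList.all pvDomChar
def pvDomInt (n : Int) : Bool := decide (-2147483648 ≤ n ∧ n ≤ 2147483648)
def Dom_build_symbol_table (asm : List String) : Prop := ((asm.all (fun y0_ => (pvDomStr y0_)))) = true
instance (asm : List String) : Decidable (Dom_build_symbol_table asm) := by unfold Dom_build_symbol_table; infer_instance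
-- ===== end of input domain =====

-- B replaces A's interleaved parse-and-build loop by a parse-once token stream
-- (label/idx and @-symbol tokens) folded into the table in a second pass; objective: alternative.


-- Shared parsing helpers: literal ports of the string expressions both Pythons use.
-- l.split("(")[1].split(")")[0]  (the [1]/[0] accesses are guarded by '"(" in l' in both programs)
def pvLabel (l : String) : String :=
  ((PySem.Str.split? (((PySem.Str.split? l "(").getD []).getD 1 "") ")").getD []).getD 0 ""
-- i.split("@")[1]  (guarded by '"@" in i')
def pvSym (i : String) : String := ((PySem.Str.split? i "@").getD []).getD 1 ""
-- '"@" in i and not i[i.index("@")+1].isdigit()'; the pyGet? is none exactly where Python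
-- raises IndexError (line ending in '@'), which Pre_ excludes; .getD '0' is arbitrary there.
def pvVarGuard (i : String) : Bool :=
  PySem.Str.isIn "@" i &&
    !(PySem.Str.isdigit ((PySem.Str.pyGet? i (PySem.Str.find i "@" + 1)).getD '0'))

-- ===== PORT A =====
-- ret = {...}; ret.update({("R" + str(n)): n for n in range(16)})
def pvInitA : PySem.Dict String Int :=
  PySem.Dict.update
    (PySem.Dict.ofList [("SP", 0), ("LCL", 1), ("ARG", 2), ("THIS", 3), ("THAT", 4),
      ("SCREEN", 16384), ("KBD", 24576)])
    ((PySem.List.pyRange 0 16 1).map (fun n => ("R" ++ PySem.Int.toStr n, n)))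

-- the single for-loop of A over state (ret, idx, addr)
def pvALoop (labels : List String) :
    List String → PySem.Dict String Int → Int → Int → PySem.Dict String Int
  | [], ret, _, _ => ret
  | i :: rest, ret, idx, addr =>
    if PySem.Str.isIn "(" i then
      pvALoop labels rest (ret.insert (pvLabel i) idx) idx addr
    else
      if pvVarGuard i then
        if !ret.contains (pvSym i) && !labels.contains (pvSym i) then
          pvALoop labels rest (ret.insert (pvSym i) addr) (idx + 1) (addr + 1)
        else
          pvALoop labels rest ret (idx + 1) addr
      else
        pvALoop labels rest ret (idx + 1) addr

def build_symbol_table (asm : List String) : List (String × Int) :=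
  let labels := (asm.filter (fun l => PySem.Str.isIn "(" l)).map pvLabel
  (pvALoop labels asm pvInitA 0 16).items

-- ===== PORT B =====
-- pass 1: tokens = [(name, some idx) for a label line, (name, none) for an @-symbol line]
def pvBTokens : List String → Int → List (String × Option Int)
  | [], _ => []
  | line :: rest, idx =>
    if PySem.Str.isIn "(" line then
      (pvLabel line, some idx) :: pvBTokens rest idx
    else
      if pvVarGuard line then
        (pvSym line, none) :: pvBTokens rest (idx + 1)
      else
        pvBTokens rest (idx + 1)

-- ret = {...}; for n in range(16): ret["R" + str(n)] = n
def pvInitB : PySem.Dict String Int :=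
  (PySem.List.pyRange 0 16 1).foldl (fun d n => d.insert ("R" ++ PySem.Int.toStr n) n)
    (PySem.Dict.ofList [("SP", 0), ("LCL", 1), ("ARG", 2), ("THIS", 3), ("THAT", 4),
      ("SCREEN", 16384), ("KBD", 24576)])

-- pass 2: fold the tokens into the table
def pvBLoop (lset : PySem.Set String) :
    List (String × Option Int) → PySem.Dict String Int → Int → PySem.Dict String Int
  | [], ret, _ => ret
  | (name, some v) :: rest, ret, addr => pvBLoop lset rest (ret.insert name v) addr
  | (name, none) :: rest, ret, addr =>
    if !lset.contains name && !ret.contains name then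
      pvBLoop lset rest (ret.insert name addr) (addr + 1)
    else
      pvBLoop lset rest ret addr

def build_symbol_table_alt (asm : List String) : List (String × Int) :=
  let tokens := pvBTokens asm 0
  let labelNames := PySem.Set.ofList
    (tokens.filterMap (fun t => if t.2.isSome then some t.1 else none))
  (pvBLoop labelNames tokens pvInitB 16).items

-- ===== PRECONDITION & SPEC =====
-- Pre_ excludes exactly the inputs where A raises IndexError: a line without '(' whose
-- first '@' is its last character (i[i.index("@")+1] is out of range); B raises there too.
def Pre_build_symbol_table (asm : List String) : Prop :=
  ∀ l ∈ asm, PySem.Str.isIn "(" l = false → PySem.Str.isIn "@" l = true →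
    PySem.Str.find l "@" + 1 < PySem.Str.len l
instance (asm : List String) : Decidable (Pre_build_symbol_table asm) := by
  unfold Pre_build_symbol_table; infer_instance

def pvWitness_build_symbol_table : List String := ["@sum", "(LOOP)", "@LOOP", "@5", "D=M"]

def Spec_build_symbol_table (asm : List String) (out : List (String × Int)) : Prop :=
  out = build_symbol_table_alt asm
instance (asm : List String) (out : List (String × Int)) : Decidable (Spec_build_symbol_table asm out) := by
  unfold Spec_build_symbol_table; infer_instance

-- ===== CLAIM (what is proved, stated in full; the proofs are below) =====
def Claim_equal_build_symbol_table : Prop := ∀ (asm : List String), Dom_build_symbol_table asm → Pre_build_symbol_table asm → Spec_build_symbol_table asm (build_symbol_table asm)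

-- ===== LEMMAS AND PROOFS =====

-- the two initial tables coincide: dict.update IS the fold of insert over the pairs
theorem pvInit_eq : pvInitA = pvInitB := by
  unfold pvInitA pvInitB PySem.Dict.update
  rw [List.foldl_map]

-- the label names B extracts from the tokens are exactly A's `labels` list, for any idx
theorem pvBTokens_labels (asm : List String) (idx : Int) :
    (pvBTokens asm idx).filterMap (fun t => if t.2.isSome then some t.1 else none)
      = (asm.filter (fun l => PySem.Str.isIn "(" l)).map pvLabel := by
  induction asm generalizing idx with
  | nil => rfl
  | cons l rest ih =>
    by_cases h : PySem.Chars.isIn ['('] l.toList = true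
    · simp [pvBTokens, h, ih]
    · by_cases hg : pvVarGuard l = true <;>
        simp [pvBTokens, h, hg, ih]

-- main loop correspondence: A's single pass equals B's fold over the token stream,
-- whenever the list `labels` and the set `lset` agree as membership tests
theorem pvLoop_eq (labels : List String) (lset : PySem.Set String)
    (hmem : ∀ s, labels.contains s = lset.contains s) :
    ∀ (asm : List String) (ret : PySem.Dict String Int) (idx addr : Int),
      pvALoop labels asm ret idx addr = pvBLoop lset (pvBTokens asm idx) ret addr := by
  intro asm
  induction asm with
  | nil => intro ret idx addr; rfl
  | cons i rest ih =>
    intro ret idx addr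
    simp only [pvALoop, pvBTokens]
    by_cases h : PySem.Str.isIn "(" i = true
    · rw [if_pos h, if_pos h, ih]
      simp only [pvBLoop]
    · rw [if_neg h, if_neg h]
      by_cases hg : pvVarGuard i = true
      · rw [if_pos hg, if_pos hg]
        simp only [pvBLoop]
        have hc' : (!ret.contains (pvSym i) && !labels.contains (pvSym i))
            = (!lset.contains (pvSym i) && !ret.contains (pvSym i)) := by
          rw [hmem, Bool.and_comm]
        rw [hc']
        by_cases hc : (!lset.contains (pvSym i) && !ret.contains (pvSym i)) = true
        · rw [if_pos hc, if_pos hc, ih]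
        · rw [if_neg hc, if_neg hc, ih]
      · rw [if_neg hg, if_neg hg, ih]

theorem pvContains_ofList (L : List String) (s : String) :
    L.contains s = (PySem.Set.ofList L).contains s := by
  by_cases h : s ∈ L <;> simp [PySem.Set.mem_ofList, h]

-- ===== VERDICT (by name: the statement is the Claim_ definition above) =====
theorem build_symbol_table_spec : Claim_equal_build_symbol_table := by
  intro asm _ _
  unfold Spec_build_symbol_table build_symbol_table build_symbol_table_alt
  dsimp only
  rw [pvBTokens_labels, pvInit_eq,
    pvLoop_eq _ _ (fun s => pvContains_ofList _ s) asm pvInitB 0 16]
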